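-- pv_equiv track=rewrite | github.com/IcyBlast428/StopFireAssignments | ParallelGroupBy_2.py | aggregation_Task_4_2
-- ===== SOURCE A (Python) =====
-- def aggregation_Task_4_2(data): # return data structure: [[], [], [], []]
--     result = []
--     for i in range(len(data)):
--         for item in data[i]:
--             d = []
--             for x in result:
--                 d.append(x[0])
--             if item[0] in d:
--                 index = d.index(item[0])
--                 result[index][1] += item[1] # sum temperature
--                 result[index][2] += item[2] # sum count
--             else:
--                 result.append(item)
--     return result
-- ===== SOURCE B (Python) =====
-- def aggregation_Task_4_2(data):
--     # Staged passes: flatten, list the keys in first-seen order, then build each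
--     # aggregate row by a per-key group scan (no incremental accumulator).
--     items = [item for sub in data for item in sub]
--     firsts = list(dict.fromkeys(item[0] for item in items))
--     out = []
--     for k in firsts:
--         group = [item for item in items if item[0] == k]
--         row = group[0]
--         if len(group) > 1:
--             row = row[:]
--             row[1] = sum(item[1] for item in group)
--             row[2] = sum(item[2] for item in group)
--         out.append(row)
--     return out
-- ===== Notes on version B (the rewrite author's own statement) =====
-- stated objective: alternative
-- what changed: Replaces A's incremental accumulator (rebuilding the key list and list.index-updating a growing result per item) with staged passes: flatten once, list the distinct first columns in first-seen order, then build each output row by a per-key group scan summing columns 1 and 2.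
import Mathlib
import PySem

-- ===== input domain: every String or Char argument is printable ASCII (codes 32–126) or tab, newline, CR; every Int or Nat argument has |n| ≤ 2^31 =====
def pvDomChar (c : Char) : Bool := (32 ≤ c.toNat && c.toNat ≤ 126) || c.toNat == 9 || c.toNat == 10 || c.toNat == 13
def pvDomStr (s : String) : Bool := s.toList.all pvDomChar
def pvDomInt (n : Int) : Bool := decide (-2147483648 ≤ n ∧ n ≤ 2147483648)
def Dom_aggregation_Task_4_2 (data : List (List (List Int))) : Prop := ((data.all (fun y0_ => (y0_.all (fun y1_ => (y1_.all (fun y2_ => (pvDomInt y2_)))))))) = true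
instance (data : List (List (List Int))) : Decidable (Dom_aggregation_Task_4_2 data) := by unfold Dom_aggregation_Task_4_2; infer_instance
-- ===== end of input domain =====

-- B builds the result in staged passes (flatten, first-seen key list, one group scan per key)
-- instead of A's per-item accumulator update; equivalence is about the RETURN value only:
-- A aliases and mutates the caller's item lists in place, B does not.

-- ===== PORT A =====
-- row[1] += item[1]; row[2] += item[2]  (exact under Pre_, where both lists have length ≥ 3)
def pvUpdRow (row item : List Int) : List Int :=
  (row.set 1 (row.getD 1 0 + item.getD 1 0)).set 2 (row.getD 2 0 + item.getD 2 0)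

-- one iteration of A's inner 'for item in data[i]' body (item[0] ported as headI, exact on
-- nonempty item, which Pre_ guarantees)
def pvStepA (result : List (List Int)) (item : List Int) : List (List Int) :=
  let d := result.map (fun x => x.headI)
  if item.headI ∈ d then
    match PySem.List.index? d item.headI with
    | some index => result.set index (pvUpdRow (result.getD index []) item)
    | none => result
  else
    result ++ [item]

def aggregation_Task_4_2 (data : List (List (List Int))) : List (List Int) :=
  data.foldl (fun result sub => sub.foldl pvStepA result) []

-- ===== PORT B =====
-- one output row of B: the per-key group scan ('group[0]' ported as headI, exact because the
-- group of a key drawn from items is nonempty; item[1]/item[2] ported as getD, exact under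
-- Pre_, which gives every member of a group of size ≥ 2 length ≥ 3)
def pvRowB (items : List (List Int)) (k : Int) : List Int :=
  let group := items.filter (fun it => it.headI == k)
  if 1 < group.length then
    (group.headI.set 1 ((group.map (fun it => it.getD 1 0)).sum)).set 2
      ((group.map (fun it => it.getD 2 0)).sum)
  else
    group.headI

def aggregation_Task_4_2_alt (data : List (List (List Int))) : List (List Int) :=
  let items := data.flatten
  let firsts := PySem.List.dedup (items.map (fun it => it.headI))
  firsts.map (pvRowB items)

-- ===== PRECONDITION & SPEC =====
-- Pre_ excludes exactly the inputs where Python A raises IndexError: an empty item (item[0]),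
-- or a repeated first-column key some of whose items are shorter than 3 (indices 1/2 read or written).
def Pre_aggregation_Task_4_2 (data : List (List (List Int))) : Prop :=
  ∀ item ∈ data.flatten, item ≠ [] ∧
    (2 ≤ data.flatten.countP (fun it => it.headI == item.headI) → 3 ≤ item.length)
instance (data : List (List (List Int))) : Decidable (Pre_aggregation_Task_4_2 data) := by
  unfold Pre_aggregation_Task_4_2; infer_instance
def pvWitness_aggregation_Task_4_2 : List (List (List Int)) :=
  [[[1, 10, 1], [2, 5, 1]], [[1, 7, 2]]]

def Spec_aggregation_Task_4_2 (data : List (List (List Int))) (out : List (List Int)) : Prop := out = aggregation_Task_4_2_alt data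
instance (data : List (List (List Int))) (out : List (List Int)) : Decidable (Spec_aggregation_Task_4_2 data out) := by unfold Spec_aggregation_Task_4_2; infer_instance

-- ===== CLAIM (what is proved, stated in full; the proofs are below) =====
def Claim_equal_aggregation_Task_4_2 : Prop := ∀ (data : List (List (List Int))), Dom_aggregation_Task_4_2 data → Pre_aggregation_Task_4_2 data → Spec_aggregation_Task_4_2 data (aggregation_Task_4_2 data)

-- ===== LEMMAS AND PROOFS =====

-- the group of key k, and A's row for k after processing a list of items
def pvGrp (items : List (List Int)) (k : Int) : List (List Int) :=
  items.filter (fun it => it.headI == k)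

def pvRowA (items : List (List Int)) (k : Int) : List Int :=
  (pvGrp items k).tail.foldl pvUpdRow (pvGrp items k).headI

theorem pvUpdRow_headI (row item : List Int) : (pvUpdRow row item).headI = row.headI := by
  cases row <;> simp [pvUpdRow, List.set]

theorem pvUpdRow_length (row item : List Int) : (pvUpdRow row item).length = row.length := by
  simp [pvUpdRow]

theorem pvFoldUpd_headI (l : List (List Int)) (r : List Int) :
    (l.foldl pvUpdRow r).headI = r.headI := by
  induction l generalizing r with
  | nil => rfl
  | cons x xs ih => rw [List.foldl_cons, ih, pvUpdRow_headI]

theorem pvGrp_ne_nil {items : List (List Int)} {k : Int}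
    (h : k ∈ items.map (fun it => it.headI)) : pvGrp items k ≠ [] := by
  obtain ⟨it, hmem, hk⟩ := List.mem_map.1 h
  intro hnil
  have : it ∈ pvGrp items k := List.mem_filter.2 ⟨hmem, by simp [hk]⟩
  simp [hnil] at this

theorem pvGrp_headI_headI {items : List (List Int)} {k : Int}
    (h : pvGrp items k ≠ []) : (pvGrp items k).headI.headI = k := by
  have hmem : (pvGrp items k).headI ∈ pvGrp items k := by
    cases hg : pvGrp items k with
    | nil => exact absurd hg h
    | cons a t => simp
  have := (List.mem_filter.1 hmem).2
  simpa using this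

theorem pvRowA_headI {items : List (List Int)} {k : Int}
    (h : k ∈ items.map (fun it => it.headI)) : (pvRowA items k).headI = k := by
  rw [pvRowA, pvFoldUpd_headI]
  exact pvGrp_headI_headI (pvGrp_ne_nil h)

theorem pvGrp_append (items : List (List Int)) (item : List Int) (k : Int) :
    pvGrp (items ++ [item]) k
      = pvGrp items k ++ (if item.headI = k then [item] else []) := by
  simp only [pvGrp, List.filter_append]
  congr 1
  by_cases h : item.headI = k <;> simp [h]

theorem pvDedup_snoc (xs : List Int) (x : Int) :
    PySem.List.dedup (xs ++ [x])
      = if x ∈ xs then PySem.List.dedup xs else PySem.List.dedup xs ++ [x] := by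
  simp only [PySem.List.dedup_eq_ofList, PySem.Set.ofList_eq_foldl, List.foldl_append,
    List.foldl_cons, List.foldl_nil]
  rw [show (xs.foldl PySem.Set.add []) = PySem.Set.ofList xs from rfl]
  simp only [PySem.Set.add]
  have hc : PySem.Set.contains (PySem.Set.ofList xs) x = true ↔ x ∈ xs := by
    rw [PySem.Set.contains_iff, ← PySem.List.dedup_eq_ofList]
    exact PySem.List.mem_dedup _ _
  by_cases hx : x ∈ xs
  · rw [if_pos (hc.2 hx), if_pos hx]
  · rw [if_neg (fun h => hx (hc.1 h)), if_neg hx]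

-- invariant: A's accumulator after processing `items` is the first-seen key list mapped
-- through the iterated-update row
theorem pvA_foldl_eq (items : List (List Int)) :
    items.foldl pvStepA []
      = (PySem.List.dedup (items.map (fun it => it.headI))).map (pvRowA items) := by
  induction items using List.reverseRecOn with
  | nil => rfl
  | append_singleton l x ih =>
    rw [List.foldl_append, List.foldl_cons, List.foldl_nil, ih]
    set K := PySem.List.dedup (l.map (fun it => it.headI)) with hK
    have hKnd : K.Nodup := PySem.List.nodup_dedup _
    have hKmem : ∀ k, k ∈ K ↔ k ∈ l.map (fun it => it.headI) := fun k =>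
      PySem.List.mem_dedup _ _
    have hmapK : (K.map (pvRowA l)).map (fun r => r.headI) = K := by
      rw [List.map_map]
      exact List.map_congr_left (fun k hk => pvRowA_headI ((hKmem k).1 hk)) |>.trans
        (List.map_id _)
    have hdedup : PySem.List.dedup ((l ++ [x]).map (fun it => it.headI))
        = if x.headI ∈ l.map (fun it => it.headI) then K else K ++ [x.headI] := by
      rw [List.map_append, List.map_singleton, pvDedup_snoc]
    by_cases hmem : x.headI ∈ l.map (fun it => it.headI)
    · -- key already present: A updates in place, B's groups for x.headI gain x at the end
      rw [hdedup, if_pos hmem]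
      have hxK : x.headI ∈ K := (hKmem _).2 hmem
      obtain ⟨i, hidx⟩ := Option.isSome_iff_exists.1
        ((PySem.List.index?_isSome_iff K x.headI).2 hxK)
      obtain ⟨hi, hKi, _⟩ := PySem.List.getElem_of_index?_eq_some hidx
      have hmemd : x.headI ∈ (K.map (pvRowA l)).map (fun r => r.headI) := by
        rw [hmapK]; exact hxK
      have hgetD : (K.map (pvRowA l)).getD i [] = pvRowA l K[i] := by
        rw [List.getD_eq_getElem?_getD, List.getElem?_eq_getElem (by simpa using hi)]
        simp
      have hstepA : pvStepA (K.map (pvRowA l)) x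
          = (K.map (pvRowA l)).set i (pvUpdRow ((K.map (pvRowA l)).getD i []) x) := by
        simp only [pvStepA]
        rw [hmapK, if_pos hxK, hidx]
      rw [hgetD] at hstepA
      rw [hstepA]
      apply List.ext_getElem (by simp)
      intro j hj1 hj2
      have hjK : j < K.length := by simpa using hj2
      by_cases hji : j = i
      · subst hji
        have : pvRowA (l ++ [x]) K[j] = pvUpdRow (pvRowA l K[j]) x := by
          unfold pvRowA
          rw [pvGrp_append, if_pos hKi.symm]
          have hne : pvGrp l K[j] ≠ [] := pvGrp_ne_nil (by rw [hKi]; exact hmem)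
          cases hg : pvGrp l K[j] with
          | nil => exact absurd hg hne
          | cons a t => simp [List.foldl_append]
        rw [hKi] at this
        simp [hKi, this]
      · have hij : i ≠ j := fun h => hji h.symm
        have hne : K[j] ≠ x.headI := by
          intro h
          apply hji
          have h' : K[j] = K[i] := by rw [h, hKi]
          exact hKnd.getElem_inj_iff.mp h'
        have : pvRowA (l ++ [x]) K[j] = pvRowA l K[j] := by
          unfold pvRowA
          rw [pvGrp_append, if_neg (by simp [Ne.symm hne]), List.append_nil]
        simp [hij, this]
    · -- new key: both append the item itself
      rw [hdedup, if_neg hmem]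
      have hmemd : x.headI ∉ (K.map (pvRowA l)).map (fun r => r.headI) := by
        rw [hmapK]; exact fun h => hmem ((hKmem _).1 h)
      simp only [pvStepA]
      rw [if_neg hmemd, List.map_append, List.map_singleton]
      congr 1
      · apply List.map_congr_left
        intro k hk
        have hkx : k ≠ x.headI := fun h => hmem (h ▸ (hKmem k).1 hk)
        unfold pvRowA
        rw [pvGrp_append, if_neg (by simp [Ne.symm hkx]), List.append_nil]
      · have hgrp : pvGrp (l ++ [x]) x.headI = [x] := by
          rw [pvGrp_append, if_pos (by simp)]
          have : pvGrp l x.headI = [] := by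
            cases hg : pvGrp l x.headI with
            | nil => rfl
            | cons a t =>
              exfalso
              have ha : a ∈ pvGrp l x.headI := by rw [hg]; simp
              have := List.mem_filter.1 ha
              exact hmem (List.mem_map.2 ⟨a, this.1, by simpa using this.2⟩)
          simp [this]
        simp [pvRowA, hgrp]

-- iterated pvUpdRow from a row of length ≥ 3 is the closed set-of-sums form
theorem pvFoldUpd_sum (l : List (List Int)) (r : List Int) (hr : 3 ≤ r.length) :
    l.foldl pvUpdRow r
      = (r.set 1 (r.getD 1 0 + (l.map (fun it => it.getD 1 0)).sum)).set 2
          (r.getD 2 0 + (l.map (fun it => it.getD 2 0)).sum) := by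
  induction l generalizing r with
  | nil =>
    simp only [List.foldl_nil, List.map_nil, List.sum_nil, add_zero]
    have h1 : (1 : ℕ) < r.length := by omega
    have h2 : (2 : ℕ) < r.length := by omega
    rw [List.getD_eq_getElem r 0 h1, List.getD_eq_getElem r 0 h2,
      List.set_getElem_self h1, List.set_getElem_self h2]
  | cons x xs ih =>
    rw [List.foldl_cons, ih _ (by rw [pvUpdRow_length]; exact hr)]
    have h1 : (1 : ℕ) < r.length := by omega
    have h2 : (2 : ℕ) < r.length := by omega
    have hg1 : (pvUpdRow r x).getD 1 0 = r.getD 1 0 + x.getD 1 0 := by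
      rw [pvUpdRow, List.getD_eq_getElem _ 0 (by simp; omega),
        List.getElem_set_ne (by omega), List.getElem_set (h := by simpa using h1)]
      simp
    have hg2 : (pvUpdRow r x).getD 2 0 = r.getD 2 0 + x.getD 2 0 := by
      rw [pvUpdRow, List.getD_eq_getElem _ 0 (by simp; omega),
        List.getElem_set (h := by simpa using h2)]
      simp
    rw [hg1, hg2, pvUpdRow]
    rw [List.set_comm _ _ (by omega : (2 : ℕ) ≠ 1), List.set_set, List.set_set]
    simp only [List.map_cons, List.sum_cons]
    ring_nf
  -- final rearrangement of sums is pure arithmetic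

-- under Pre_, A's iterated-update row equals B's group-scan row
theorem pvRowA_eq_pvRowB (items : List (List Int)) (k : Int)
    (hk : k ∈ items.map (fun it => it.headI))
    (hpre : ∀ item ∈ items, item ≠ [] ∧
      (2 ≤ items.countP (fun it => it.headI == item.headI) → 3 ≤ item.length)) :
    pvRowA items k = pvRowB items k := by
  have hne : pvGrp items k ≠ [] := pvGrp_ne_nil hk
  unfold pvRowA pvRowB
  rw [show items.filter (fun it => it.headI == k) = pvGrp items k from rfl]
  cases hg : pvGrp items k with
  | nil => exact absurd hg hne
  | cons a t =>
    cases t with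
    | nil => simp
    | cons b t' =>
      have hlen : ∀ it ∈ pvGrp items k, 3 ≤ it.length := by
        intro it hit
        have hmem := List.mem_filter.1 hit
        have hkey : it.headI = k := by simpa using hmem.2
        have hcnt : 2 ≤ items.countP (fun j => j.headI == it.headI) := by
          have : items.countP (fun j => j.headI == it.headI)
              = (pvGrp items k).length := by
            rw [hkey, pvGrp, List.countP_eq_length_filter]
          rw [this, hg]; simp
        exact (hpre it hmem.1).2 hcnt
      have ha3 : 3 ≤ a.length := hlen a (by rw [hg]; simp)
      rw [if_pos (by simp)]
      rw [show (a :: b :: t').tail = b :: t' from rfl,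
        show (a :: b :: t').headI = a from rfl,
        pvFoldUpd_sum _ _ ha3]
      simp only [List.map_cons, List.sum_cons]

-- ===== VERDICT (by name: the statement is the Claim_ definition above) =====
theorem aggregation_Task_4_2_spec : Claim_equal_aggregation_Task_4_2 := by
  intro data _ hpre
  unfold Spec_aggregation_Task_4_2 aggregation_Task_4_2 aggregation_Task_4_2_alt
  rw [← List.foldl_flatten, pvA_foldl_eq]
  exact List.map_congr_left fun k hk =>
    pvRowA_eq_pvRowB _ _ ((PySem.List.mem_dedup _ _).1 hk) hpre
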